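-- pv_equiv track=rewrite | github.com/EduardoL555/suffix-arrays- | python/sais_fixed.py | _ls_types
-- ===== SOURCE A (Python) =====
-- from typing import List, Tuple
--
-- def _ls_types(T: List[int]) -> List[bool]:
--     """
--     S[i] = True si el sufijo en i es de tipo S; False si es L.
--     Reglas:
--       - S[n-1] = True
--       - Para i<n-1: S[i] = (T[i] < T[i+1]) or (T[i] == T[i+1] and S[i+1])
--     """
--     n = len(T)
--     S = [False] * n
--     S[-1] = True
--     for i in range(n - 2, -1, -1):
--         if T[i] < T[i + 1] or (T[i] == T[i + 1] and S[i + 1]):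
--             S[i] = True
--     return S
-- ===== SOURCE B (Python) =====
-- from itertools import groupby
-- from typing import List
--
--
-- def _ls_types(T: List[int]) -> List[bool]:
--     # Run-length decomposition: each maximal run of equal values shares one type.
--     runs = [(v, sum(1 for _ in g)) for v, g in groupby(T)]
--     if not runs:
--         return []
--     types = [v < w for (v, _), (w, _) in zip(runs, runs[1:])] + [True]
--     out: List[bool] = []
--     for (_, length), t in zip(runs, types):
--         out.extend([t] * length)
--     return out
-- ===== Notes on version B (the rewrite author's own statement) =====
-- stated objective: alternative
-- what changed: Replaces the right-to-left carried-flag index scan over a preallocated array with a run-length decomposition (itertools.groupby): each maximal run of equal values gets one type bool (run value < next run value, last run True) which is then expanded over the run's length.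
-- outside the precondition, e.g. on _ls_types([]): A raises IndexError, B returns []
import Mathlib
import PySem

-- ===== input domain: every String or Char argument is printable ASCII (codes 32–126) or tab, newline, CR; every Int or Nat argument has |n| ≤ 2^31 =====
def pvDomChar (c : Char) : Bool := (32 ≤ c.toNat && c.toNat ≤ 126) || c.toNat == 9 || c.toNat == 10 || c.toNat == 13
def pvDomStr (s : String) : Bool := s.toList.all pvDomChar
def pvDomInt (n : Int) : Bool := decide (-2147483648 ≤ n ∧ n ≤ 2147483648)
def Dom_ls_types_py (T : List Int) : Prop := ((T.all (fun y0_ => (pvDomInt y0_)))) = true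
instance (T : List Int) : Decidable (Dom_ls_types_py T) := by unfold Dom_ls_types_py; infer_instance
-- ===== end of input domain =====

-- B replaces A's right-to-left carried-flag scan with a run-length (groupby) decomposition:
-- one type per maximal run of equal values, expanded over the run's length (objective: alternative).

-- ===== PORT A =====
-- loop body of A's 'for i in range(n-2, -1, -1)' (named so the proofs can speak about it)
def lsStepA (T : List Int) (S : List Bool) (i : Int) : List Bool :=
  if PySem.List.pyGetD T i 0 < PySem.List.pyGetD T (i + 1) 0 ∨
     (PySem.List.pyGetD T i 0 = PySem.List.pyGetD T (i + 1) 0 ∧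
      PySem.List.pyGetD S (i + 1) false = true) then
    PySem.List.pySetD S i true
  else S

def ls_types_py (T : List Int) : List Bool :=
  -- n = len(T); S = [False]*n; S[-1] = True (IndexError on empty T: excluded by Pre_); loop
  (PySem.List.pyRange ((T.length : Int) - 2) (-1) (-1)).foldl (lsStepA T)
    (PySem.List.pySetD (List.replicate T.length false) (-1) true)

-- ===== PORT B =====
-- run-length encoding of T: port of the groupby comprehension '[(v, len(g)) for v, g in groupby(T)]'
def lsRuns : List Int → List (Int × Nat)
  | [] => []
  | x :: xs =>
    match lsRuns xs with
    | [] => [(x, 1)]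
    | (v, l) :: rest => if x = v then (x, l + 1) :: rest else (x, 1) :: (v, l) :: rest

-- '[v < w for (v,_),(w,_) in zip(runs, runs[1:])] + [True]'
def lsTypes (runs : List (Int × Nat)) : List Bool :=
  ((runs.zip runs.tail).map (fun p => decide (p.1.1 < p.2.1))) ++ [true]

-- 'for (_, length), t in zip(runs, types): out.extend([t] * length)'
def lsExpand (runs : List (Int × Nat)) (types : List Bool) : List Bool :=
  ((runs.zip types).map (fun p => List.replicate p.1.2 p.2)).flatten

def ls_types_py_alt (T : List Int) : List Bool :=
  if lsRuns T = [] then []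
  else lsExpand (lsRuns T) (lsTypes (lsRuns T))

-- ===== PRECONDITION & SPEC =====
-- Pre_ excludes only the empty list, on which A raises IndexError (S[-1] on an empty array).
def Pre_ls_types_py (T : List Int) : Prop := T ≠ []
instance (T : List Int) : Decidable (Pre_ls_types_py T) := by unfold Pre_ls_types_py; infer_instance
def pvWitness_ls_types_py : List Int := [2, 1, 1, 3]

def Spec_ls_types_py (T : List Int) (out : List Bool) : Prop := out = ls_types_py_alt T
instance (T : List Int) (out : List Bool) : Decidable (Spec_ls_types_py T out) := by unfold Spec_ls_types_py; infer_instance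

-- ===== CLAIM (what is proved, stated in full; the proofs are below) =====
def Claim_equal_ls_types_py : Prop := ∀ (T : List Int), Dom_ls_types_py T → Pre_ls_types_py T → Spec_ls_types_py T (ls_types_py T)

-- ===== LEMMAS AND PROOFS =====

-- the suffix-type recursion both programs compute
def lsRec : List Int → List Bool
  | [] => []
  | [_] => [true]
  | a :: b :: rest =>
      (decide (a < b) || (decide (a = b) && (lsRec (b :: rest)).headI)) :: lsRec (b :: rest)

theorem lsRec_ne_nil (T : List Int) (h : T ≠ []) : lsRec T ≠ [] := by
  match T with
  | [_] => simp [lsRec]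
  | a :: b :: rest => simp [lsRec]

-- === A-side ===

theorem pySetD_neg_one_set {α : Type} (xs : List α) (h : xs ≠ []) (v : α) :
    PySem.List.pySetD xs (-1) v = xs.set (xs.length - 1) v := by
  have hn : 0 < xs.length := List.length_pos_iff.mpr h
  simp only [PySem.List.pySetD, PySem.List.pySet?, PySem.List.pyIdx?]
  rw [if_neg (by omega), if_pos (by omega)]
  simp

theorem lsStepA_eq (T : List Int) (k : Nat) (hk : k + 1 < T.length) :
    lsStepA T (List.replicate (k + 1) false ++ lsRec (T.drop (k + 1))) (k : Int)
      = List.replicate k false ++ lsRec (T.drop k) := by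
  have hrest : T.drop (k + 1) ≠ [] := by
    intro hcon
    have := congrArg List.length hcon
    simp at this; omega
  have hdrop : T.drop k = T[k] :: T.drop (k + 1) := List.drop_eq_getElem_cons (by omega)
  have hhead : (T.drop (k + 1)).headI = T[k + 1] := by
    rw [List.drop_eq_getElem_cons (by omega : k + 1 < T.length)]; rfl
  -- reads of T
  have hT1 : PySem.List.pyGetD T (k : Int) 0 = T[k] := by
    rw [PySem.List.pyGetD_natCast]
    exact List.getD_eq_getElem T 0 (by omega)
  have hT2 : PySem.List.pyGetD T ((k : Int) + 1) 0 = T[k + 1] := by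
    rw [show ((k : Int) + 1) = ((k + 1 : Nat) : Int) by push_cast; ring]
    rw [PySem.List.pyGetD_natCast]
    exact List.getD_eq_getElem T 0 (by omega)
  -- read of S at k+1: past the replicate prefix, head of the lsRec suffix
  have hS : PySem.List.pyGetD (List.replicate (k + 1) false ++ lsRec (T.drop (k + 1))) ((k : Int) + 1) false
      = (lsRec (T.drop (k + 1))).headI := by
    rw [show ((k : Int) + 1) = ((k + 1 : Nat) : Int) by push_cast; ring]
    rw [PySem.List.pyGetD_natCast]
    rcases List.exists_cons_of_ne_nil (lsRec_ne_nil _ hrest) with ⟨y, ys, hy⟩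
    rw [hy]
    rw [List.getD_eq_getElem _ _ (by simp)]
    rw [List.getElem_append_right (by simp)]
    simp
  -- the write, if it happens
  have hset : (List.replicate (k + 1) false ++ lsRec (T.drop (k + 1))).set k true
      = List.replicate k false ++ true :: lsRec (T.drop (k + 1)) := by
    rw [List.replicate_succ' (n := k), List.append_assoc, List.set_append]
    rw [if_neg (by simp)]
    simp
  have hcons : lsRec (T.drop k)
      = (decide (T[k] < T[k + 1]) || (decide (T[k] = T[k + 1]) && (lsRec (T.drop (k + 1))).headI))
        :: lsRec (T.drop (k + 1)) := by
    rcases List.exists_cons_of_ne_nil hrest with ⟨z, zs, hz⟩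
    have hz' : z = T[k + 1] := by rw [hz] at hhead; simpa using hhead
    subst hz'
    rw [hdrop, hz, lsRec, ← hz]
  unfold lsStepA
  rw [hT1, hT2, hS]
  by_cases hc : T[k] < T[k + 1] ∨ (T[k] = T[k + 1] ∧ (lsRec (T.drop (k + 1))).headI = true)
  · rw [if_pos hc, PySem.List.pySetD_natCast, hset, hcons]
    have hb : (decide (T[k] < T[k+1]) || (decide (T[k] = T[k+1]) && (lsRec (T.drop (k + 1))).headI)) = true := by
      rcases hc with h | ⟨h1, h2⟩
      · simp [h]
      · simp [h1, h2]
    rw [hb]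
  · rw [if_neg hc, hcons]
    have hb : (decide (T[k] < T[k+1]) || (decide (T[k] = T[k+1]) && (lsRec (T.drop (k + 1))).headI)) = false := by
      push Not at hc
      rcases hc with ⟨h1, h2⟩
      by_cases he : T[k] = T[k + 1]
      · simp [he, h2 he]
      · simp [he]; exact h1
    rw [hb, List.replicate_succ' (n := k), List.append_assoc]
    rfl

theorem A_inv (T : List Int) : ∀ (k : Nat), k + 1 ≤ T.length →
    (PySem.List.pyRange ((k : Int) - 1) (-1) (-1)).foldl (lsStepA T)
      (List.replicate k false ++ lsRec (T.drop k)) = lsRec T := by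
  intro k
  induction k with
  | zero =>
    intro _
    rw [PySem.List.pyRange_neg_one_eq_nil (by omega)]
    simp
  | succ k ih =>
    intro hk
    rw [show ((k + 1 : Nat) : Int) - 1 = (k : Int) by push_cast; ring]
    rw [PySem.List.pyRange_neg_one_cons (by omega : (-1 : Int) < (k : Int))]
    rw [List.foldl_cons, lsStepA_eq T k (by omega)]
    exact ih (by omega)

theorem A_eq_lsRec (T : List Int) (h : T ≠ []) : ls_types_py T = lsRec T := by
  have hn : 0 < T.length := List.length_pos_iff.mpr h
  unfold ls_types_py
  have hinit : PySem.List.pySetD (List.replicate T.length false) (-1) true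
      = List.replicate (T.length - 1) false ++ lsRec (T.drop (T.length - 1)) := by
    rw [pySetD_neg_one_set _ (by simp; omega)]
    have hdrop : T.drop (T.length - 1) = [T[T.length - 1]] := by
      rw [List.drop_eq_getElem_cons (by omega)]
      rw [List.drop_of_length_le (by omega)]
    rw [hdrop, lsRec]
    rw [show T.length = (T.length - 1) + 1 by omega, List.replicate_succ' (n := T.length - 1)]
    rw [List.set_append, if_neg (by simp)]
    simp
  rw [hinit]
  rw [show ((T.length : Int)) - 2 = ((T.length - 1 : Nat) : Int) - 1 by push_cast [hn]; omega]
  exact A_inv T (T.length - 1) (by omega)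

-- === B-side ===

theorem lsRuns_cons_eq (x : Int) (xs : List Int) :
    lsRuns (x :: xs) = match lsRuns xs with
      | [] => [(x, 1)]
      | (v, l) :: rest => if x = v then (x, l + 1) :: rest else (x, 1) :: (v, l) :: rest := rfl

theorem lsRuns_shape (x : Int) (xs : List Int) :
    ∃ l rs, lsRuns (x :: xs) = (x, l) :: rs ∧ 1 ≤ l := by
  match xs with
  | [] => exact ⟨1, [], rfl, le_refl 1⟩
  | y :: ys =>
    rcases lsRuns_shape y ys with ⟨l, rs, hl, h1⟩
    by_cases hxy : x = y
    · refine ⟨l + 1, rs, ?_, by omega⟩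
      rw [lsRuns_cons_eq, hl]
      simp [hxy]
    · refine ⟨1, (y, l) :: rs, ?_, le_refl 1⟩
      rw [lsRuns_cons_eq, hl]
      simp [hxy]

theorem lsTypes_len_irrel (v : Int) (l₁ l₂ : Nat) (rs : List (Int × Nat)) :
    lsTypes ((v, l₁) :: rs) = lsTypes ((v, l₂) :: rs) := by
  cases rs <;> simp [lsTypes]

theorem lsTypes_cons₂ (v : Int) (l : Nat) (w : Int) (m : Nat) (rs : List (Int × Nat)) :
    lsTypes ((v, l) :: (w, m) :: rs) = decide (v < w) :: lsTypes ((w, m) :: rs) := by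
  simp [lsTypes]

theorem lsExpand_cons (r : Int × Nat) (rs : List (Int × Nat)) (t : Bool) (ts : List Bool) :
    lsExpand (r :: rs) (t :: ts) = List.replicate r.2 t ++ lsExpand rs ts := by
  simp [lsExpand]

theorem lsTypes_ne_nil (rs : List (Int × Nat)) : lsTypes rs ≠ [] := by
  simp [lsTypes]

theorem B_eq_lsRec (T : List Int) : ls_types_py_alt T = lsRec T := by
  match T with
  | [] => rfl
  | [a] => simp [ls_types_py_alt, lsRuns, lsExpand, lsTypes, lsRec]
  | a :: b :: rest =>
    have ih := B_eq_lsRec (b :: rest)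
    rcases lsRuns_shape b rest with ⟨l, rs, hl, h1⟩
    rcases List.exists_cons_of_ne_nil (lsTypes_ne_nil ((b, l) :: rs)) with ⟨t0, ts, ht⟩
    have hBtail : ls_types_py_alt (b :: rest) = List.replicate l t0 ++ lsExpand rs ts := by
      unfold ls_types_py_alt
      rw [hl, if_neg (by simp), ht, lsExpand_cons]
    have hhead : (lsRec (b :: rest)).headI = t0 := by
      rw [← ih, hBtail]
      rcases Nat.exists_eq_add_of_le h1 with ⟨l', hl'⟩
      rw [show l = l' + 1 by omega, List.replicate_succ]
      rfl
    by_cases hab : a = b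
    · -- a joins b's run: same run types, one longer first run
      have hruns : lsRuns (a :: b :: rest) = (a, l + 1) :: rs := by
        rw [lsRuns_cons_eq, hl]
        simp [hab]
      have htypes : lsTypes ((a, l + 1) :: rs) = t0 :: ts := by
        rw [hab, lsTypes_len_irrel b (l + 1) l rs, ht]
      unfold ls_types_py_alt
      rw [hruns, if_neg (by simp), htypes, lsExpand_cons]
      rw [lsRec]
      rw [show (decide (a < b) || (decide (a = b) && (lsRec (b :: rest)).headI)) = t0 by
        simp [hab, hhead]]
      rw [← ih, hBtail]
      simp [List.replicate_succ]
    · -- a starts a new run of length 1, typed by a < b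
      have hruns : lsRuns (a :: b :: rest) = (a, 1) :: (b, l) :: rs := by
        rw [lsRuns_cons_eq, hl]
        simp [hab]
      unfold ls_types_py_alt
      rw [hruns, if_neg (by simp), lsTypes_cons₂, lsExpand_cons]
      rw [lsRec]
      rw [show (decide (a < b) || (decide (a = b) && (lsRec (b :: rest)).headI)) = decide (a < b) by
        simp [hab]]
      rw [← ih]
      unfold ls_types_py_alt
      rw [hl, if_neg (by simp), ht, lsExpand_cons]
      simp

-- ===== VERDICT (by name: the statement is the Claim_ definition above) =====
theorem ls_types_py_spec : Claim_equal_ls_types_py := by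
  intro T _ hpre
  unfold Spec_ls_types_py
  rw [A_eq_lsRec T hpre, B_eq_lsRec T]
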